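-- pv_equiv track=rewrite | github.com/Avighan/project-jarvis | experiments/experiment_15/run.py | check_hallucinations
-- ===== SOURCE A (Python) =====
-- def check_hallucinations(validated_facts: list[str], conversation_text: str) -> list[str]:
--     conv_lower = conversation_text.lower()
--     hallucinations = []
--     for fact in validated_facts:
--         sig_words = [w for w in fact.lower().split() if len(w) > 5]
--         if sig_words:
--             def word_in_conv(w):
--                 if w in conv_lower:
--                     return True
--                 return w[:5] in conv_lower
--             miss_rate = sum(1 for w in sig_words if not word_in_conv(w)) / len(sig_words)
--             if miss_rate > 0.5:
--                 hallucinations.append(fact)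
--     return hallucinations
-- ===== SOURCE B (Python) =====
-- def check_hallucinations(validated_facts: list[str], conversation_text: str) -> list[str]:
--     conv = conversation_text.lower()
--     # Index every length-5 substring of the conversation once; every significant word
--     # has len > 5, so A's "w in conv or w[:5] in conv" collapses to "w[:5] in conv",
--     # one O(1) set lookup against this 5-gram index.
--     grams = set(conv[i:i + 5] for i in range(len(conv) - 4))
--
--     def hallucinated(fact: str) -> bool:
--         sig = [w for w in fact.lower().split() if len(w) > 5]
--         return bool(sig) and 2 * sum(w[:5] not in grams for w in sig) > len(sig)
--
--     return [fact for fact in validated_facts if hallucinated(fact)]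
-- ===== Notes on version B (the rewrite author's own statement) =====
-- stated objective: faster
-- what changed: A appends inside a loop doing up to two substring scans of the conversation per significant word; B builds a hash set of all length-5 substrings of the lowered conversation once and then simply filters the facts by a predicate that counts prefix-misses with a single O(1) set lookup per word (exact because 'w in conv' implies 'w[:5] in conv' for words longer than 5).
import Mathlib
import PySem

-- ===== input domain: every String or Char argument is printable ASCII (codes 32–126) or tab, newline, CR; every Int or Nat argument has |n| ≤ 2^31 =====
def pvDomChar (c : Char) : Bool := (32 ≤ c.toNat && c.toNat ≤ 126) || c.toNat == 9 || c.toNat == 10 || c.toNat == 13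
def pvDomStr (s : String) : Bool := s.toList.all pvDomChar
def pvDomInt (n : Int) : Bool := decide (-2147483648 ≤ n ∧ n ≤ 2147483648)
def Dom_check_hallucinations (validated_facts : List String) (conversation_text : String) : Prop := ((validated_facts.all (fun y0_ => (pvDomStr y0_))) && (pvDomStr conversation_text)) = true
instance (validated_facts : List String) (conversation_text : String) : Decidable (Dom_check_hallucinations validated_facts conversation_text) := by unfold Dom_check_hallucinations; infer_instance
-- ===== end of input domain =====

-- B builds a set of all length-5 substrings of the conversation once and filters the
-- facts by a counting predicate, replacing A's per-word substring scans (objective: faster).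

-- ===== PORT A =====
-- the nested 'def word_in_conv(w)' of A
def pvWordInConv (conv_lower w : String) : Bool :=
  if PySem.Str.isIn w conv_lower then true
  else PySem.Str.isIn (PySem.Str.slice w none (some 5)) conv_lower

def check_hallucinations (validated_facts : List String) (conversation_text : String) : List String :=
  let conv_lower := PySem.Str.lower conversation_text
  validated_facts.foldl (fun hallucinations fact =>
    let sig_words := (PySem.Str.split₀ (PySem.Str.lower fact)).filter
      (fun w => decide ((5 : Int) < PySem.Str.len w))
    if sig_words = [] then hallucinations
    else
      let misses := sig_words.foldl
        (fun acc w => if pvWordInConv conv_lower w then acc else acc + 1) (0 : Int)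
      -- 'misses / len > 0.5' (exact float division of small ints) ported exactly as 2*misses > len
      if (sig_words.length : Int) < 2 * misses then hallucinations ++ [fact]
      else hallucinations) []

-- ===== PORT B =====
-- 'grams = set(conv[i:i+5] for i in range(len(conv) - 4))'
def pvGrams (conv : String) : PySem.Set String :=
  PySem.Set.ofList ((PySem.List.pyRange 0 (PySem.Str.len conv - 4)).map
    (fun i => PySem.Str.slice conv (some i) (some (i + 5))))

-- 'def hallucinated(fact)'
def pvHallucinated (grams : PySem.Set String) (fact : String) : Bool :=
  let sig := (PySem.Str.split₀ (PySem.Str.lower fact)).filter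
    (fun w => decide ((5 : Int) < PySem.Str.len w))
  !sig.isEmpty &&
    decide ((sig.length : Int)
      < 2 * (sig.countP (fun w => !PySem.Set.contains grams (PySem.Str.slice w none (some 5))) : Int))

def check_hallucinations_alt (validated_facts : List String) (conversation_text : String) : List String :=
  let conv := PySem.Str.lower conversation_text
  let grams := pvGrams conv
  validated_facts.filter (pvHallucinated grams)

-- ===== PRECONDITION & SPEC =====
def Spec_check_hallucinations (validated_facts : List String) (conversation_text : String) (out : List String) : Prop := out = check_hallucinations_alt validated_facts conversation_text
instance (validated_facts : List String) (conversation_text : String) (out : List String) : Decidable (Spec_check_hallucinations validated_facts conversation_text out) := by unfold Spec_check_hallucinations; infer_instance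

-- ===== CLAIM (what is proved, stated in full; the proofs are below) =====
def Claim_equal_check_hallucinations : Prop := ∀ (validated_facts : List String) (conversation_text : String), Dom_check_hallucinations validated_facts conversation_text → Spec_check_hallucinations validated_facts conversation_text (check_hallucinations validated_facts conversation_text)

-- ===== LEMMAS AND PROOFS =====

-- x[:5] of a string as a list take
lemma pv_take5_toList (w : String) :
    (PySem.Str.slice w none (some 5)).toList = w.toList.take 5 := by
  rw [PySem.Str.toList_slice, PySem.Chars.slice_eq_listSlice]
  rw [show ((5:Int)) = (((5:Nat)) : Int) by norm_cast, PySem.List.slice_to_natCast]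

-- a 5-char string is in the gram set iff it occurs in conv
lemma pv_contains_grams_iff (conv x : String) (hx : x.toList.length = 5) :
    PySem.Set.contains (pvGrams conv) x = PySem.Str.isIn x conv := by
  unfold pvGrams
  rw [Bool.eq_iff_iff, PySem.Str.isIn_iff_infix]
  rw [show (PySem.Set.contains _ x = true) ↔ x ∈ PySem.Set.ofList _ from PySem.Set.contains_iff _ x]
  rw [PySem.Set.mem_ofList, List.mem_map]
  constructor
  · rintro ⟨i, hi, hsl⟩
    rw [PySem.List.mem_pyRange_one] at hi
    obtain ⟨h0, h1⟩ := hi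
    lift i to ℕ using h0 with j
    have hsl' : x.toList = List.take 5 (List.drop j conv.toList) := by
      rw [← hsl, PySem.Str.toList_slice, PySem.Chars.slice_eq_listSlice]
      rw [show ((j : Int) + 5) = ((j : Int) + ((5:Nat) : Int)) by norm_cast]
      rw [PySem.List.slice_natCast_add]
    have hpre : x.toList <+: List.drop j conv.toList := by
      rw [hsl']; exact List.take_prefix _ _
    exact (hpre.isInfix).trans (List.drop_suffix _ _).isInfix
  · intro hinf
    obtain ⟨j, hpref⟩ := (PySem.Chars.exists_prefix_drop_iff_isIn x.toList conv.toList).mpr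
      ((PySem.Chars.isIn_iff_infix _ _).mpr hinf)
    have hlen : 5 ≤ conv.toList.length - j := by
      have := hpref.length_le
      simpa [hx] using this
    have hjle : j + 5 ≤ conv.toList.length := by omega
    refine ⟨(j : Int), ?_, ?_⟩
    · rw [PySem.List.mem_pyRange_one, PySem.Str.len_eq]
      exact ⟨by positivity, by omega⟩
    · apply String.ext
      rw [PySem.Str.toList_slice, PySem.Chars.slice_eq_listSlice]
      rw [show ((j : Int) + 5) = ((j : Int) + ((5:Nat) : Int)) by norm_cast]
      rw [PySem.List.slice_natCast_add]
      rw [List.prefix_iff_eq_take] at hpref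
      rw [hx] at hpref; exact hpref.symm

-- for |w| > 5, A's word_in_conv equals B's gram lookup of w[:5]: 'w in conv' already
-- implies 'w[:5] in conv', so the two-branch test collapses to the prefix test
lemma pv_word_pred_eq (conv w : String) (hw : (5 : Int) < PySem.Str.len w) :
    pvWordInConv conv w
      = PySem.Set.contains (pvGrams conv) (PySem.Str.slice w none (some 5)) := by
  have hlw : 5 < w.toList.length := by rw [PySem.Str.len_eq] at hw; exact_mod_cast hw
  have hx : (PySem.Str.slice w none (some 5)).toList.length = 5 := by
    rw [pv_take5_toList, List.length_take]; omega
  rw [pv_contains_grams_iff _ _ hx]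
  unfold pvWordInConv
  by_cases hin : PySem.Str.isIn w conv = true
  · rw [if_pos hin]
    symm
    rw [PySem.Str.isIn_iff_infix, pv_take5_toList]
    exact ((List.take_prefix 5 w.toList).isInfix).trans ((PySem.Str.isIn_iff_infix _ _).mp hin)
  · rw [if_neg hin]

-- A's miss counter over a word list equals countP of the negated predicate
lemma pv_misses_eq_countP (p : String → Bool) (l : List String) (a : Int) :
    l.foldl (fun acc w => if p w then acc else acc + 1) a = a + (l.countP (fun w => !p w) : Int) := by
  induction l generalizing a with
  | nil => simp
  | cons x xs ih =>
    by_cases hx : p x = true <;> simp [hx, ih, List.countP_cons] <;> ring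

-- ===== VERDICT (by name: the statement is the Claim_ definition above) =====
theorem check_hallucinations_spec : Claim_equal_check_hallucinations := by
  intro validated_facts conversation_text _
  unfold Spec_check_hallucinations check_hallucinations check_hallucinations_alt
  simp only
  set conv := PySem.Str.lower conversation_text with hconv
  have hbody : ∀ (acc : List String) (fact : String),
      (let sig_words := (PySem.Str.split₀ (PySem.Str.lower fact)).filter
          (fun w => decide ((5 : Int) < PySem.Str.len w))
        if sig_words = [] then acc
        else
          let misses := sig_words.foldl
            (fun a w => if pvWordInConv conv w then a else a + 1) (0 : Int)
          if (sig_words.length : Int) < 2 * misses then acc ++ [fact] else acc)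
      = if pvHallucinated (pvGrams conv) fact then acc ++ [fact] else acc := by
    intro acc fact
    set sig := (PySem.Str.split₀ (PySem.Str.lower fact)).filter
        (fun w => decide ((5 : Int) < PySem.Str.len w)) with hsig
    by_cases h0 : sig = []
    · have hc : pvHallucinated (pvGrams conv) fact = false := by
        simp only [pvHallucinated, ← hsig, h0]
        simp
      rw [if_pos h0, hc]
      simp
    · have hne : sig.isEmpty = false := by simp [h0]
      have hc : pvHallucinated (pvGrams conv) fact
          = decide ((sig.length : Int) < 2 * (sig.countP (fun w => !PySem.Set.contains (pvGrams conv)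
              (PySem.Str.slice w none (some 5))) : Int)) := by
        simp only [pvHallucinated, ← hsig, hne]
        simp
      have hmiss : sig.foldl (fun a w => if pvWordInConv conv w then a else a + 1) (0 : Int)
          = (sig.countP (fun w => !PySem.Set.contains (pvGrams conv)
              (PySem.Str.slice w none (some 5))) : Int) := by
        have hcg : sig.foldl (fun a w => if pvWordInConv conv w then a else a + 1) (0 : Int)
            = sig.foldl (fun a w => if PySem.Set.contains (pvGrams conv)
                (PySem.Str.slice w none (some 5)) then a else a + 1) (0 : Int) := by
          apply PySem.List.foldl_congr_mem'
          intro w hw a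
          have h5 : (5 : Int) < PySem.Str.len w := by
            have := List.of_mem_filter (by rw [hsig] at hw; exact hw)
            simpa using this
          rw [pv_word_pred_eq _ _ h5]
        rw [hcg, pv_misses_eq_countP]; ring
      rw [if_neg h0, hmiss, hc]
      simp only [decide_eq_true_eq]
  -- fold with append-if of a pure predicate = filter
  calc validated_facts.foldl (fun acc fact =>
        let sig_words := (PySem.Str.split₀ (PySem.Str.lower fact)).filter
          (fun w => decide ((5 : Int) < PySem.Str.len w))
        if sig_words = [] then acc
        else
          let misses := sig_words.foldl
            (fun a w => if pvWordInConv conv w then a else a + 1) (0 : Int)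
          if (sig_words.length : Int) < 2 * misses then acc ++ [fact] else acc) []
      = validated_facts.foldl (fun acc fact =>
          if pvHallucinated (pvGrams conv) fact then acc ++ [fact] else acc) [] := by
        apply PySem.List.foldl_congr_mem'
        intro fact _ acc
        exact hbody acc fact
    _ = validated_facts.filter (pvHallucinated (pvGrams conv)) := by
        rw [PySem.List.foldl_append_if_eq_filter]; simp
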